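-- pv_equiv track=rewrite | github.com/ToniBiro/Proiect-GeomComp | backend/prgc/test_app.py | getCircularPerm
-- ===== SOURCE A (Python) =====
-- def getCircularPerm (polygon):
-- 	# given a polygonal chain, returns all permutation to the left
-- 	# only one at a time (its an iterable)
-- 	firstPolygon = polygon
-- 	currentPolygon = polygon
-- 	yield polygon
-- 	while True:
-- 		currentPolygon = currentPolygon[1:]+currentPolygon[:1]
-- 		if currentPolygon == firstPolygon: break
-- 		yield currentPolygon
-- ===== SOURCE B (Python) =====
-- def getCircularPerm(polygon):
--     # yield the original, then each left-rotation built directly by index slicing,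
--     # stopping early if a rotation equals the original (periodic chain)
--     yield polygon
--     for i in range(1, len(polygon)):
--         rot = polygon[i:] + polygon[:i]
--         if rot == polygon:
--             break
--         yield rot
-- ===== Notes on version B (the rewrite author's own statement) =====
-- stated objective: alternative
-- what changed: Replaces the unbounded while-True loop that mutates a running 'current' rotation with a bounded for-loop over indices that slices each rotation directly from the original polygon.
import Mathlib
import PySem

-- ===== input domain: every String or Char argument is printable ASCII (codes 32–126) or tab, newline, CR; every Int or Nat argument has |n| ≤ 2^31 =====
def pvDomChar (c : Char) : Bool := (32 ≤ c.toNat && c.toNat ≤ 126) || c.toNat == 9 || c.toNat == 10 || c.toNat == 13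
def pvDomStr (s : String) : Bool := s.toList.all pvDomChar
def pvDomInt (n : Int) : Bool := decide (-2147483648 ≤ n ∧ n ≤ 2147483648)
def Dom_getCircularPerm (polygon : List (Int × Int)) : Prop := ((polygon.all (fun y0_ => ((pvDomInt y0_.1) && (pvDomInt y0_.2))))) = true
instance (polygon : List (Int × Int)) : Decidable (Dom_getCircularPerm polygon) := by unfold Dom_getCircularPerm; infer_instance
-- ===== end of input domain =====

-- B replaces A's unbounded mutate-current while-loop by a bounded index loop slicing each rotation from the original (alternative decomposition, same cost).


-- ===== PORT A =====
-- A's while-True loop: each step replaces current by current[1:]+current[:1]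
-- (for index 1 these slices are exactly List.drop 1 / List.take 1), breaks when
-- it equals the first polygon. The loop provably terminates within length
-- iterations (rotation by length is the identity), so fuel = length is exact.
def getCircularPermLoopA (first cur : List (Int × Int)) : Nat → List (List (Int × Int))
  | 0 => []
  | fuel + 1 =>
    let c := cur.drop 1 ++ cur.take 1
    if c = first then [] else c :: getCircularPermLoopA first c fuel

def getCircularPerm (polygon : List (Int × Int)) : List (List (Int × Int)) :=
  polygon :: getCircularPermLoopA polygon polygon polygon.length

-- ===== PORT B =====
-- B's for-loop over i in range(1, len(polygon)): rot = polygon[i:] + polygon[:i]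
def getCircularPermLoopB (p : List (Int × Int)) (i n : Nat) : List (List (Int × Int)) :=
  if i < n then
    let rot := p.drop i ++ p.take i
    if rot = p then [] else rot :: getCircularPermLoopB p (i + 1) n
  else []
termination_by n - i

def getCircularPerm_alt (polygon : List (Int × Int)) : List (List (Int × Int)) :=
  polygon :: getCircularPermLoopB polygon 1 polygon.length

-- ===== PRECONDITION & SPEC =====
def Spec_getCircularPerm (polygon : List (Int × Int)) (out : List (List (Int × Int))) : Prop := out = getCircularPerm_alt polygon
instance (polygon : List (Int × Int)) (out : List (List (Int × Int))) : Decidable (Spec_getCircularPerm polygon out) := by unfold Spec_getCircularPerm; infer_instance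

-- ===== CLAIM (what is proved, stated in full; the proofs are below) =====
def Claim_equal_getCircularPerm : Prop := ∀ (polygon : List (Int × Int)), Dom_getCircularPerm polygon → Spec_getCircularPerm polygon (getCircularPerm polygon)

-- ===== LEMMAS AND PROOFS =====

-- one A-step on any list is rotation by 1
theorem drop1_take1_eq_rotate (l : List (Int × Int)) :
    l.drop 1 ++ l.take 1 = l.rotate 1 := by
  cases l with
  | nil => simp
  | cons a t =>
    rw [List.rotate_eq_drop_append_take (by simp)]

-- A's loop, started at rotation j of p with fuel length - j, equals B's loop at index j+1
theorem loopA_eq_loopB (p : List (Int × Int)) (j : Nat) (hj : j < p.length) :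
    getCircularPermLoopA p (p.rotate j) (p.length - j) = getCircularPermLoopB p (j + 1) p.length := by
  have hfuel : p.length - j = (p.length - (j + 1)) + 1 := by omega
  rw [hfuel, getCircularPermLoopA, drop1_take1_eq_rotate, List.rotate_rotate]
  rw [getCircularPermLoopB]
  by_cases hlt : j + 1 < p.length
  · simp only [if_pos hlt]
    rw [← List.rotate_eq_drop_append_take (by omega)]
    by_cases heq : p.rotate (j + 1) = p
    · simp [heq]
    · simp only [if_neg heq]
      have ih := loopA_eq_loopB p (j + 1) hlt
      rw [← ih]
  · -- j + 1 = length : rotation by length is p, so A breaks; B's range is exhausted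
    have hje : j + 1 = p.length := by omega
    simp only [if_neg hlt]
    rw [hje, List.rotate_length]
    simp
termination_by p.length - j

theorem getCircularPerm_eq (polygon : List (Int × Int)) :
    getCircularPerm polygon = getCircularPerm_alt polygon := by
  unfold getCircularPerm getCircularPerm_alt
  cases hn : polygon.length with
  | zero =>
    rw [getCircularPermLoopB]
    simp [getCircularPermLoopA]
  | succ m =>
    have h0 : 0 < polygon.length := by omega
    have := loopA_eq_loopB polygon 0 h0
    rw [List.rotate_zero] at this
    simpa [hn] using this

-- ===== VERDICT (by name: the statement is the Claim_ definition above) =====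
theorem getCircularPerm_spec : Claim_equal_getCircularPerm := by
  intro polygon _
  unfold Spec_getCircularPerm
  exact getCircularPerm_eq polygon
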